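-- pv_equiv track=rewrite | github.com/liyubjut/UVA_Network | network_generator.py | _count_uncovered
-- ===== SOURCE A (Python) =====
-- from typing import List, Tuple, Dict
--
-- def _count_uncovered(cover: List[List[bool]]) -> int:
--     """计算未被覆盖的配送点数量
--     Calculate the number of uncovered delivery points
--
--     Args:
--         cover (List[List[bool]]): 覆盖矩阵 / Coverage matrix
--
--     Returns:
--         int: 未覆盖的配送点数量 / Number of uncovered delivery points
--     """
--     if not cover or not cover[0]:
--         return 0
--     num_charging_stations = len(cover)
--     num_delivery_points = len(cover[0])
--     uncovered = 0
--     for j in range(num_delivery_points):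
--         if not any(cover[i][j] for i in range(num_charging_stations)):
--             uncovered += 1
--     return uncovered
-- ===== SOURCE B (Python) =====
-- from typing import List
--
-- def _count_uncovered(cover: List[List[bool]]) -> int:
--     if not cover or not cover[0]:
--         return 0
--     n = len(cover[0])
--     covered = set()
--     for row in cover:
--         for j, v in enumerate(row[:n]):
--             if v:
--                 covered.add(j)
--     return n - len(covered)
-- ===== Notes on version B (the rewrite author's own statement) =====
-- stated objective: alternative
-- what changed: Replaced the per-column scan with nested index lookups by a single row-major pass that accumulates the set of covered column indices and returns n minus its size.
import Mathlib
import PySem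

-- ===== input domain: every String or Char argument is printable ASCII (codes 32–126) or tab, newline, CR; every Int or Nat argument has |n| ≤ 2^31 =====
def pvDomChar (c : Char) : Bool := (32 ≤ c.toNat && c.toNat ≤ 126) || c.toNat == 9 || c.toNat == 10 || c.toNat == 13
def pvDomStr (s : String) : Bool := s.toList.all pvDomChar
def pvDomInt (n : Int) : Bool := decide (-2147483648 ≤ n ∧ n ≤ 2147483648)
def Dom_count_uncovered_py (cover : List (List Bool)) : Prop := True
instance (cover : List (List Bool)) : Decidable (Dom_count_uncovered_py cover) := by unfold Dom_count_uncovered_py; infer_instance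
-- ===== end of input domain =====

-- B replaces A's per-column scans by one row-major pass accumulating the set of covered
-- column indices (alternative decomposition, same asymptotic cost).

-- ===== PORT A =====
-- 'cover[i][j]' is ported total via getD; under Pre_ every index accessed is in range, so it is exact.
def count_uncovered_py (cover : List (List Bool)) : Int :=
  match cover with
  | [] => 0
  | r0 :: _ =>
    if r0.isEmpty then 0
    else
      let m := cover.length
      let n := r0.length
      (List.range n).foldl (fun acc j =>
        if (List.range m).any (fun i => (cover.getD i []).getD j false) then acc
        else acc + 1) 0

-- ===== PORT B =====
-- 'row[:n]' is ported as 'row.take n' (exact: n = len(cover[0]) ≥ 0).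
def count_uncovered_py_alt (cover : List (List Bool)) : Int :=
  match cover with
  | [] => 0
  | r0 :: _ =>
    if r0.isEmpty then 0
    else
      let n := r0.length
      let covered : PySem.Set Int := cover.foldl
        (fun s row => (PySem.List.enumerate (row.take n) 0).foldl
          (fun s p => if p.2 then PySem.Set.add s p.1 else s) s)
        PySem.Set.empty
      (n : Int) - PySem.Set.len covered

-- ===== PRECONDITION & SPEC =====
-- Pre_ holds exactly where Python A returns normally: it fails exactly when some column scan
-- reaches a row shorter than the first row before meeting a True in that column (IndexError).
def Pre_count_uncovered_py (cover : List (List Bool)) : Prop :=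
  ∀ j < (cover.headD []).length, ∀ i < cover.length,
    (cover.getD i []).length ≤ j → ∃ i' < i, (cover.getD i' []).getD j false = true
instance (cover : List (List Bool)) : Decidable (Pre_count_uncovered_py cover) := by unfold Pre_count_uncovered_py; infer_instance
def pvWitness_count_uncovered_py : List (List Bool) := [[true, false], [false, false]]

def Spec_count_uncovered_py (cover : List (List Bool)) (out : Int) : Prop := out = count_uncovered_py_alt cover
instance (cover : List (List Bool)) (out : Int) : Decidable (Spec_count_uncovered_py cover out) := by unfold Spec_count_uncovered_py; infer_instance

-- ===== CLAIM (what is proved, stated in full; the proofs are below) =====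
def Claim_equal_count_uncovered_py : Prop := ∀ (cover : List (List Bool)), Dom_count_uncovered_py cover → Pre_count_uncovered_py cover → Spec_count_uncovered_py cover (count_uncovered_py cover)

-- ===== LEMMAS AND PROOFS =====

-- scanning indices 0..len-1 with a total lookup is scanning the list itself
lemma any_range_getD (xs : List (List Bool)) (f : List Bool → Bool) :
    (List.range xs.length).any (fun i => f (xs.getD i [])) = xs.any f := by
  rw [Bool.eq_iff_iff]
  simp only [List.any_eq_true, List.mem_range]
  constructor
  · rintro ⟨i, hi, h⟩
    exact ⟨xs[i], List.getElem_mem hi, by rwa [List.getD_eq_getElem xs [] hi] at h⟩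
  · rintro ⟨x, hx, h⟩
    obtain ⟨i, hi, rfl⟩ := List.mem_iff_getElem.mp hx
    exact ⟨i, hi, by rwa [List.getD_eq_getElem xs [] hi]⟩

-- A's counting loop is a countP
lemma foldl_skip_add (l : List ℕ) (p : ℕ → Bool) (a : Int) :
    l.foldl (fun acc j => if p j then acc else acc + 1) a
      = a + (l.countP (fun j => !p j) : Int) := by
  induction l generalizing a with
  | nil => simp
  | cons x t ih =>
    simp only [List.foldl_cons, List.countP_cons, ih]
    by_cases h : p x <;> simp [h] <;> push_cast <;> ring

-- a fold of per-element folds is one fold over the flattened stream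
lemma foldl_foldl_eq_foldl_flatMap {α β γ : Type} (f : γ → β → γ) (g : α → List β)
    (l : List α) (init : γ) :
    l.foldl (fun acc x => (g x).foldl f acc) init = (l.flatMap g).foldl f init := by
  induction l generalizing init with
  | nil => rfl
  | cons x t ih => simp [List.foldl_append, ih]

-- two Nodup lists with the same members have the same length
lemma length_eq_of_nodup_mem {α : Type} [DecidableEq α] {l₁ l₂ : List α}
    (h₁ : l₁.Nodup) (h₂ : l₂.Nodup) (h : ∀ a, a ∈ l₁ ↔ a ∈ l₂) :
    l₁.length = l₂.length :=
  ((List.perm_ext_iff_of_nodup h₁ h₂).mpr h).length_eq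

theorem count_uncovered_py_spec : Claim_equal_count_uncovered_py := by
  intro cover _ hpre
  unfold Spec_count_uncovered_py
  cases cover with
  | nil => rfl
  | cons r0 rest =>
    by_cases h0 : r0.isEmpty
    · simp [count_uncovered_py, count_uncovered_py_alt, h0]
    · set cov := r0 :: rest with hcov
      set n := r0.length with hn
      -- the covered predicate on a column index
      set q : ℕ → Bool := fun j => cov.any (fun row => row.getD j false) with hq
      -- A's value
      have hA : count_uncovered_py cov = ((List.range n).countP (fun j => !q j) : Int) := by
        simp only [count_uncovered_py, hcov, h0]
        have := foldl_skip_add (List.range n) q 0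
        calc (List.range n).foldl (fun acc j =>
              if (List.range cov.length).any (fun i => (cov.getD i []).getD j false) then acc
              else acc + 1) 0
            = (List.range n).foldl (fun acc j => if q j then acc else acc + 1) 0 := by
              apply PySem.List.foldl_congr_mem'
              intro j _ acc
              rw [any_range_getD cov (fun row => row.getD j false)]
          _ = 0 + ((List.range n).countP (fun j => !q j) : Int) := foldl_skip_add _ _ _
          _ = _ := by ring
      -- B's accumulated set as a Set.ofList of the flattened stream of covered indices
      set g : List Bool → List Int :=
        fun row => ((PySem.List.enumerate (row.take n) 0).filter (·.2)).map (·.1) with hg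
      set L : List Int := cov.flatMap g with hL
      have hcovered : cov.foldl
          (fun s row => (PySem.List.enumerate (row.take n) 0).foldl
            (fun s p => if p.2 then PySem.Set.add s p.1 else s) s)
          PySem.Set.empty = PySem.Set.ofList L := by
        have hinner : ∀ row ∈ cov, ∀ (s : PySem.Set Int),
            (PySem.List.enumerate (row.take n) 0).foldl
              (fun s p => if p.2 then PySem.Set.add s p.1 else s) s
            = (g row).foldl PySem.Set.add s := by
          intro row _ s
          rw [hg, List.foldl_map]
          apply PySem.List.foldl_if_eq_foldl_filter
        have houter : cov.foldl
            (fun (s : PySem.Set Int) row => (PySem.List.enumerate (row.take n) 0).foldl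
              (fun s p => if p.2 then PySem.Set.add s p.1 else s) s) PySem.Set.empty
            = cov.foldl (fun s row => (g row).foldl PySem.Set.add s) PySem.Set.empty := by
          apply PySem.List.foldl_congr_mem'
          exact hinner
        exact houter.trans
          ((foldl_foldl_eq_foldl_flatMap PySem.Set.add g cov PySem.Set.empty).trans
            (by rw [PySem.Set.ofList_eq_foldl, hL]; rfl))
      have hB : count_uncovered_py_alt cov
          = (n : Int) - PySem.Set.len (PySem.Set.ofList L) := by
        simp only [count_uncovered_py_alt, hcov, h0]
        rw [← hcov, hcovered]
        simp [hn]
      -- membership in L characterised by the covered predicate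
      have hmemL : ∀ x : Int, x ∈ L ↔ ∃ k : ℕ, k < n ∧ x = (k : Int) ∧ q k := by
        intro x
        rw [hL, List.mem_flatMap]
        constructor
        · rintro ⟨row, hrow, hx⟩
          rw [hg] at hx
          simp only [List.mem_map, List.mem_filter] at hx
          obtain ⟨p, ⟨hp, hp2⟩, rfl⟩ := hx
          obtain ⟨k, hk, rfl⟩ := (PySem.List.mem_enumerate_iff _ _ _).mp hp
          have hkn : k < n := lt_of_lt_of_le hk (by simp [List.length_take])
          have hkr : k < row.length := lt_of_lt_of_le hk (by simp [List.length_take])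
          refine ⟨k, hkn, by simp, ?_⟩
          rw [hq]
          simp only [List.any_eq_true]
          refine ⟨row, hrow, ?_⟩
          rw [List.getD_eq_getElem row false hkr]
          simpa [List.getElem_take] using hp2
        · rintro ⟨k, hkn, rfl, hqk⟩
          rw [hq] at hqk
          simp only [List.any_eq_true] at hqk
          obtain ⟨row, hrow, hval⟩ := hqk
          refine ⟨row, hrow, ?_⟩
          rw [hg]
          simp only [List.mem_map, List.mem_filter]
          have hkr : k < row.length := by
            by_contra hge
            rw [List.getD_eq_getElem?_getD, List.getElem?_eq_none (by omega)] at hval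
            simp at hval
          have hkt : k < (row.take n).length := by
            rw [List.length_take]; omega
          refine ⟨((k : Int), (row.take n)[k]'hkt), ⟨?_, ?_⟩, rfl⟩
          · exact (PySem.List.mem_enumerate_iff _ _ _).mpr ⟨k, hkt, by simp⟩
          · show (row.take n)[k]'hkt = true
            rw [List.getD_eq_getElem row false hkr] at hval
            simpa [List.getElem_take] using hval
      -- compare against the canonical covered-column list
      set M : List Int := List.map (fun k : ℕ => (k : Int)) ((List.range n).filter q) with hM
      have hlenEq : (PySem.Set.ofList L).length = M.length := by
        refine length_eq_of_nodup_mem (PySem.Set.nodup_ofList L) ?_ ?_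
        · rw [hM]
          exact List.Nodup.map (fun a b h => by exact_mod_cast h)
            (List.Nodup.filter q (List.nodup_range))
        · intro x
          rw [PySem.Set.mem_ofList, hmemL, hM]
          simp only [List.mem_map, List.mem_filter, List.mem_range]
          constructor
          · rintro ⟨k, hk, rfl, hqk⟩; exact ⟨k, ⟨hk, hqk⟩, rfl⟩
          · rintro ⟨k, ⟨hk, hqk⟩, rfl⟩; exact ⟨k, hk, rfl, hqk⟩
      have hMlen : M.length = (List.range n).countP q := by
        rw [hM, List.length_map, List.countP_eq_length_filter]
      have hcount : (List.range n).countP q + (List.range n).countP (fun j => !q j) = n := by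
        have := List.length_eq_countP_add_countP (l := List.range n) (p := q)
        simpa [List.length_range] using this.symm
      have hlenInt : PySem.Set.len (PySem.Set.ofList L) = ((List.range n).countP q : Int) := by
        simp [PySem.Set.len, hlenEq, hMlen]
      rw [hA, hB, hlenInt]
      omega
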